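-- pv_equiv track=rewrite | github.com/kramer102/Udacity-intro-to-computing-search-engine | robert_kramer_socialnetwork.py | parse_attribute
-- ===== SOURCE A (Python) =====
-- def parse_attribute(next_sentence):
--     attribute = []
--     if "is connected to " in next_sentence:
--         con_start = next_sentence.find("is connected to ") + 15
--         next_sentence = next_sentence[con_start:]
--     else:
--         con_start = next_sentence.find("likes to play ") + 13
--         next_sentence = next_sentence[con_start:]
--     while next_sentence.find(',') != -1:
--         con = next_sentence[1:next_sentence.find(',')]
--         attribute.append(con)
--         next_sentence = next_sentence[next_sentence.find(',') + 1:]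
--     attribute.append(next_sentence[1:-1])
--     return attribute
-- ===== SOURCE B (Python) =====
-- def parse_attribute(next_sentence):
--     if "is connected to " in next_sentence:
--         rest = next_sentence[next_sentence.find("is connected to ") + 15:]
--     else:
--         rest = next_sentence[next_sentence.find("likes to play ") + 13:]
--     parts = rest.split(',')
--     return [p[1:] for p in parts[:-1]] + [parts[-1][1:-1]]
-- ===== Notes on version B (the rewrite author's own statement) =====
-- stated objective: simpler
-- what changed: Replaces A's while-loop that repeatedly rescans the remaining string for the next comma and reslices it by a single comma-split followed by one shaped pass over the token list (drop the first char of every piece, and also the last char of the final piece); the prefix-detection slice is unchanged.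
import Mathlib
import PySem

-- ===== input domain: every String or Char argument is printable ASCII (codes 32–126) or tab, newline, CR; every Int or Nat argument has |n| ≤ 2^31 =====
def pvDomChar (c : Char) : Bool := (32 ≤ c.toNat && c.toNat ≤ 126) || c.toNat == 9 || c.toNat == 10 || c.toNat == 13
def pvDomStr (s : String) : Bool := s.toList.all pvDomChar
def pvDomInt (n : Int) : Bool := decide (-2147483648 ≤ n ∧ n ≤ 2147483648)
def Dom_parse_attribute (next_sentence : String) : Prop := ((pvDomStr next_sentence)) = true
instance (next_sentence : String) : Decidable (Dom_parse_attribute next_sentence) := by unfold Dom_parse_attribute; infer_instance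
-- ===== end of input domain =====

-- B replaces A's repeated find(',')-and-slice while-loop with a single split on ',' followed by
-- one shaped pass over the token list (objective: simpler); the prefix detection is unchanged.

-- ===== PORT A =====
-- A's while-loop: repeatedly find ',' and slice the string, accumulating trimmed pieces.
theorem pvLoopA_dec (cs : List Char) (h : ¬ PySem.Chars.find cs [','] = -1) :
    (PySem.List.slice cs (some (PySem.Chars.find cs [','] + 1)) none).length < cs.length := by
  have hk0 : 0 ≤ PySem.Chars.find cs [','] := by
    have := PySem.Chars.neg_one_le_find cs [',']
    omega
  have hsp := PySem.Chars.find_spec (s := cs) (sub := [',']) hk0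
  obtain ⟨t, ht⟩ := hsp.1
  have hlt : (PySem.Chars.find cs [',']).toNat < cs.length := by
    by_contra hge
    have : cs.drop (PySem.Chars.find cs [',']).toNat = [] := List.drop_eq_nil_of_le (by omega)
    rw [this] at ht; simp at ht
  rw [PySem.List.slice_from cs (by omega)]
  simp only [List.length_drop]
  omega

def parseLoopA (cs : List Char) (acc : List String) : List String :=
  if h : ¬ PySem.Chars.find cs [','] = -1 then
    parseLoopA (PySem.List.slice cs (some (PySem.Chars.find cs [','] + 1)) none)
      (acc ++ [String.ofList (PySem.List.slice cs (some 1) (some (PySem.Chars.find cs [','])))])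
  else
    acc ++ [String.ofList (PySem.List.slice cs (some 1) (some (-1)))]
termination_by cs.length
decreasing_by exact pvLoopA_dec cs h

def parse_attribute (next_sentence : String) : List String :=
  let rest :=
    if PySem.Str.isIn "is connected to " next_sentence then
      PySem.Str.slice next_sentence (some (PySem.Str.find next_sentence "is connected to " + 15)) none
    else
      PySem.Str.slice next_sentence (some (PySem.Str.find next_sentence "likes to play " + 13)) none
  parseLoopA rest.toList []

-- ===== PORT B =====
-- Source B: same prefix slice, then rest.split(',') once and one shaped pass over the parts.
def parse_attribute_alt (next_sentence : String) : List String :=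
  let rest :=
    if PySem.Str.isIn "is connected to " next_sentence then
      PySem.Str.slice next_sentence (some (PySem.Str.find next_sentence "is connected to " + 15)) none
    else
      PySem.Str.slice next_sentence (some (PySem.Str.find next_sentence "likes to play " + 13)) none
  let parts := List.splitOn ',' rest.toList   -- rest.split(',')
  (PySem.List.slice parts none (some (-1))).map (fun p => String.ofList (PySem.List.slice p (some 1) none))
    ++ [String.ofList (PySem.List.slice (parts.getLastD []) (some 1) (some (-1)))]

-- ===== PRECONDITION & SPEC =====
def Spec_parse_attribute (next_sentence : String) (out : List String) : Prop := out = parse_attribute_alt next_sentence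
instance (next_sentence : String) (out : List String) : Decidable (Spec_parse_attribute next_sentence out) := by unfold Spec_parse_attribute; infer_instance

-- ===== CLAIM (what is proved, stated in full; the proofs are below) =====
def Claim_equal_parse_attribute : Prop := ∀ (next_sentence : String), Dom_parse_attribute next_sentence → Spec_parse_attribute next_sentence (parse_attribute next_sentence)

-- ===== LEMMAS AND PROOFS =====

-- splitting off the first ','-separated piece
lemma splitOn_comma_append (t r : List Char) (ht : ',' ∉ t) :
    List.splitOn ',' (t ++ ',' :: r) = t :: List.splitOn ',' r := by
  induction t with
  | nil => simp [List.splitOn, List.splitOnP_cons]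
  | cons a t ih =>
    have ha : a ≠ ',' := fun h => ht (h ▸ List.mem_cons_self)
    have ht' : ',' ∉ t := fun h => ht (List.mem_cons_of_mem a h)
    simp only [List.splitOn] at ih ⊢
    rw [List.cons_append, List.splitOnP_cons]
    simp [ha, ih ht']

lemma splitOn_no_comma (cs : List Char) (h : ',' ∉ cs) : List.splitOn ',' cs = [cs] := by
  unfold List.splitOn
  refine List.splitOnP_eq_single _ _ ?_
  intro x hx hpx
  have hx' : x = ',' := by simpa using hpx
  exact h (hx' ▸ hx)

-- A's while-loop computes B's split-then-transform shape
lemma parseLoopA_eq (cs : List Char) (acc : List String) :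
    parseLoopA cs acc =
      acc ++ ((List.splitOn ',' cs).dropLast.map (fun p => String.ofList (p.drop 1))
        ++ [String.ofList (PySem.List.slice ((List.splitOn ',' cs).getLastD []) (some 1) (some (-1)))]) := by
  induction hn : cs.length using Nat.strong_induction_on generalizing cs acc with
  | _ n ih =>
  subst hn
  rw [parseLoopA]
  by_cases h : PySem.Chars.find cs [','] = -1
  · have hnc : ',' ∉ cs := by
      have := (PySem.Chars.find_eq_neg_one_iff (s := cs) (sub := [','])).mp h
      intro hm; exact this ((List.singleton_infix_iff ',' cs).mpr hm)
    rw [splitOn_no_comma cs hnc]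
    simp [h]
  · simp only [h, not_false_iff, dif_pos]
    set k := PySem.Chars.find cs [','] with hkdef
    have hk0 : 0 ≤ k := by have := PySem.Chars.neg_one_le_find cs [',']; omega
    have hsp := PySem.Chars.find_spec (s := cs) (sub := [',']) hk0
    obtain ⟨r, hr⟩ := hsp.1
    have hr' : cs.drop k.toNat = ',' :: r := by simpa using hr.symm
    have hdec : cs = cs.take k.toNat ++ ',' :: r := by
      conv_lhs => rw [← List.take_append_drop k.toNat cs, hr']
    have hlt : k.toNat < cs.length := by
      by_contra hge
      have : cs.drop k.toNat = [] := List.drop_eq_nil_of_le (by omega)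
      rw [this] at hr'; simp at hr'
    have hnt : ',' ∉ cs.take k.toNat := by
      intro hm
      obtain ⟨i, hi, hgi⟩ := List.getElem_of_mem hm
      have hil : i < k.toNat := by simp [List.length_take] at hi; omega
      have := hsp.2 i hil
      apply this
      refine ⟨cs.drop (i + 1), ?_⟩
      have : cs.drop i = ',' :: cs.drop (i + 1) := by
        rw [List.drop_eq_getElem_cons (by omega)]
        congr 1
        rw [List.getElem_take] at hgi
        exact hgi
      simp [this]
    -- rewrite slices
    have hslice1 : PySem.List.slice cs (some (k + 1)) none = r := by
      rw [PySem.List.slice_from cs (by omega)]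
      have : (k + 1).toNat = k.toNat + 1 := by omega
      rw [this, ← List.drop_drop, hr']
      simp
    have hslice2 : PySem.List.slice cs (some 1) (some k) = (cs.take k.toNat).drop 1 := by
      have h1 : (1 : Int) = ((1 : Nat) : Int) := by norm_num
      have hk : k = ((k.toNat : Nat) : Int) := by omega
      rw [h1, hk, PySem.List.slice_natCast, List.drop_take, Int.toNat_natCast]
    have hrlen : r.length < cs.length := by
      have hlen : cs.length = k.toNat + (1 + r.length) := by
        conv_lhs => rw [hdec]
        simp [List.length_append, List.length_take]
        omega
      omega
    rw [hslice1, hslice2]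
    rw [ih r.length hrlen r _ rfl]
    conv_rhs => rw [hdec, splitOn_comma_append _ _ hnt]
    have hne : List.splitOn ',' r ≠ [] := List.splitOnP_ne_nil _ r
    rw [List.dropLast_cons_of_ne_nil hne]
    cases hsp' : List.splitOn ',' r with
    | nil => exact absurd hsp' hne
    | cons q qs => simp

lemma slice_one_none_eq_drop (p : List Char) : PySem.List.slice p (some 1) none = p.drop 1 := by
  rw [PySem.List.slice_from p (by norm_num)]
  norm_num

-- ===== VERDICT (by name: the statement is the Claim_ definition above) =====
theorem parse_attribute_spec : Claim_equal_parse_attribute := by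
  intro s _
  unfold Spec_parse_attribute parse_attribute parse_attribute_alt
  simp only []
  rw [parseLoopA_eq]
  rw [PySem.List.slice_to_neg_one]
  simp [slice_one_none_eq_drop]
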